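-- pv_equiv track=rewrite | github.com/8fdafs2/Codewars-Solu-Python | src/kyu5_Two_Joggers.py | nbr_of_laps_06
-- ===== SOURCE A (Python) =====
-- def nbr_of_laps_06(x, y):
--     """
--     brute force
--     """
--     if x < y:
--         m = y
--         while m % x != 0:
--             m += y
--     else:
--         m = x
--         while m % y != 0:
--             m += x
--     return [m // x, m // y]
-- ===== SOURCE B (Python) =====
-- def nbr_of_laps_06(x, y):
--     """
--     Euclidean gcd, then lcm-style closed form instead of brute-force stepping.
--     """
--     a, b = abs(x), abs(y)
--     while b:
--         a, b = b, a % b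
--     if x < y:
--         m = y * (abs(x) // a)
--     else:
--         m = x * (abs(y) // a)
--     return [m // x, m // y]
-- ===== Notes on version B (the rewrite author's own statement) =====
-- stated objective: faster
-- what changed: Replaced A's brute-force stepping m += step until the other runner divides m (O(lcm/max) iterations) by a Euclidean gcd loop and the closed form lcm = larger * (abs(smaller) // gcd).
import Mathlib
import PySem

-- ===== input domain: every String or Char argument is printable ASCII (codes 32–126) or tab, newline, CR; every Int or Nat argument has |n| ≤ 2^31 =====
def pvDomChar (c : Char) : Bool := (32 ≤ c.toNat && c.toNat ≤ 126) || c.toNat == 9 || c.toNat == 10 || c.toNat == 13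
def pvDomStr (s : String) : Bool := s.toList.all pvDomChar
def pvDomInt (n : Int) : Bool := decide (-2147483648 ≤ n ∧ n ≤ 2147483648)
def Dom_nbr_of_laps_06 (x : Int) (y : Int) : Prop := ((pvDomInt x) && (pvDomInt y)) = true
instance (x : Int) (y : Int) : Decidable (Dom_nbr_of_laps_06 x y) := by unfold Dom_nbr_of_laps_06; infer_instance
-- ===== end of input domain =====

-- B replaces A's brute-force stepping to the least common multiple by a Euclidean gcd
-- and a closed-form lcm, an asymptotic speed-up; equivalence of return values is proved
-- on all x ≠ 0, y ≠ 0 (elsewhere both Pythons raise ZeroDivisionError).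

-- ===== PORT A =====
-- `while m % d != 0: m += s`, run with fuel; fuel d.natAbs is enough (proved below),
-- so the fuel-0 fallthrough is never the value used on Pre_ inputs.
def pvLoopA (d s : Int) : Nat → Int → Int
  | 0, m => m
  | f + 1, m => if PySem.Int.mod m d = 0 then m else pvLoopA d s f (m + s)

def nbr_of_laps_06 (x : Int) (y : Int) : List Int :=
  let m := if x < y then pvLoopA x y x.natAbs y else pvLoopA y x y.natAbs x
  [PySem.Int.floordiv m x, PySem.Int.floordiv m y]

-- ===== PORT B =====
-- B's Euclidean loop `while b: a, b = b, a % b` over abs(x), abs(y) (both ≥ 0, so Nat).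
def pvGcd (a b : Nat) : Nat :=
  if h : b = 0 then a else pvGcd b (a % b)
termination_by b
decreasing_by exact Nat.mod_lt _ (Nat.pos_of_ne_zero h)

def nbr_of_laps_06_alt (x : Int) (y : Int) : List Int :=
  let g : Int := (pvGcd x.natAbs y.natAbs : Int)
  let m := if x < y then y * PySem.Int.floordiv (x.natAbs : Int) g
           else x * PySem.Int.floordiv (y.natAbs : Int) g
  [PySem.Int.floordiv m x, PySem.Int.floordiv m y]

-- ===== PRECONDITION & SPEC =====
-- Pre_ excludes exactly x = 0 or y = 0, where Python A raises ZeroDivisionError.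
def Pre_nbr_of_laps_06 (x : Int) (y : Int) : Prop := x ≠ 0 ∧ y ≠ 0
instance (x : Int) (y : Int) : Decidable (Pre_nbr_of_laps_06 x y) := by unfold Pre_nbr_of_laps_06; infer_instance
def pvWitness_nbr_of_laps_06 : Int × Int := (6, 4)

def Spec_nbr_of_laps_06 (x : Int) (y : Int) (out : List Int) : Prop := out = nbr_of_laps_06_alt x y
instance (x : Int) (y : Int) (out : List Int) : Decidable (Spec_nbr_of_laps_06 x y out) := by unfold Spec_nbr_of_laps_06; infer_instance

-- ===== CLAIM (what is proved, stated in full; the proofs are below) =====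
def Claim_equal_nbr_of_laps_06 : Prop := ∀ (x : Int) (y : Int), Dom_nbr_of_laps_06 x y → Pre_nbr_of_laps_06 x y → Spec_nbr_of_laps_06 x y (nbr_of_laps_06 x y)

-- ===== LEMMAS AND PROOFS =====

theorem pvGcd_eq (a b : Nat) : pvGcd a b = Nat.gcd a b := by
  induction b using Nat.strong_induction_on generalizing a with
  | _ b ih =>
    rw [pvGcd]
    split
    · simp [*]
    · rename_i h
      rw [ih (a % b) (Nat.mod_lt _ (Nat.pos_of_ne_zero h)) b]
      exact (Nat.gcd_comm b (a % b)).trans ((Nat.gcd_rec b a).symm.trans (Nat.gcd_comm b a))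

-- divisibility characterisation: d ∣ k*s ↔ (|d|/gcd) ∣ k
theorem pv_dvd_iff (d s : Int) (hd : d ≠ 0) (hs : s ≠ 0) (k : Nat) :
    d ∣ (k : Int) * s ↔ (d.natAbs / Nat.gcd d.natAbs s.natAbs) ∣ k := by
  set a := d.natAbs with ha
  set b := s.natAbs with hb
  set g := Nat.gcd a b with hgdef
  have ha0 : a ≠ 0 := Int.natAbs_ne_zero.mpr hd
  have hg : 0 < g := Nat.gcd_pos_of_pos_left _ (Nat.pos_of_ne_zero ha0)
  obtain ⟨a', ha'⟩ : g ∣ a := Nat.gcd_dvd_left a b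
  obtain ⟨b', hb'⟩ : g ∣ b := Nat.gcd_dvd_right a b
  have ha'' : a / g = a' := by rw [ha']; exact Nat.mul_div_cancel_left _ hg
  have hb'' : b / g = b' := by rw [hb']; exact Nat.mul_div_cancel_left _ hg
  have hco : Nat.Coprime a' b' := by
    rw [← ha'', ← hb'']; exact Nat.coprime_div_gcd_div_gcd hg
  rw [ha'']
  constructor
  · intro h
    have h1 : a ∣ k * b := by
      have := Int.natAbs_dvd_natAbs.mpr h
      simpa [Int.natAbs_mul] using this
    rw [ha', hb'] at h1
    have h2 : a' ∣ k * b' := by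
      refine (Nat.mul_dvd_mul_iff_left hg).mp ?_
      calc g * a' ∣ k * (g * b') := h1
        _ = g * (k * b') := by ring
    exact hco.dvd_of_dvd_mul_right h2
  · intro h
    obtain ⟨t, ht⟩ := h
    refine Int.natAbs_dvd_natAbs.mp ?_
    have : a ∣ k * b := by
      refine ⟨t * b', ?_⟩
      rw [ha', hb', ht]; ring
    simpa [Int.natAbs_mul] using this

theorem pvLoopA_eq (d s : Int) (hd : d ≠ 0) (hs : s ≠ 0) :
    ∀ (f k : Nat), 0 < k → k ≤ d.natAbs / Nat.gcd d.natAbs s.natAbs →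
      d.natAbs / Nat.gcd d.natAbs s.natAbs ≤ k + f →
      pvLoopA d s f ((k : Int) * s) = ((d.natAbs / Nat.gcd d.natAbs s.natAbs : Nat) : Int) * s := by
  intro f
  set k0 := d.natAbs / Nat.gcd d.natAbs s.natAbs with hk0
  induction f with
  | zero =>
    intro k hk hle hge
    have : k = k0 := Nat.le_antisymm hle (by omega)
    simp [pvLoopA, this]
  | succ f ih =>
    intro k hk hle hge
    rw [pvLoopA]
    by_cases hkk : k = k0
    · subst hkk
      have hdvd : PySem.Int.mod ((k0 : Int) * s) d = 0 := by
        rw [PySem.Int.mod_eq_zero_iff_dvd]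
        exact (pv_dvd_iff d s hd hs k0).mpr dvd_rfl
      rw [if_pos hdvd]
    · have hlt : k < k0 := lt_of_le_of_ne hle hkk
      have hnd : ¬ PySem.Int.mod ((k : Int) * s) d = 0 := by
        rw [PySem.Int.mod_eq_zero_iff_dvd]
        intro h
        have := Nat.le_of_dvd hk ((pv_dvd_iff d s hd hs k).mp h)
        omega
      have hstep : (k : Int) * s + s = ((k + 1 : Nat) : Int) * s := by push_cast; ring
      rw [if_neg hnd, hstep]
      exact ih (k + 1) (by omega) (by omega) (by omega)

theorem pvLoopA_closed (d s : Int) (hd : d ≠ 0) (hs : s ≠ 0) :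
    pvLoopA d s d.natAbs s = ((d.natAbs / Nat.gcd d.natAbs s.natAbs : Nat) : Int) * s := by
  have ha0 : d.natAbs ≠ 0 := Int.natAbs_ne_zero.mpr hd
  have hg : 0 < Nat.gcd d.natAbs s.natAbs :=
    Nat.gcd_pos_of_pos_left _ (Nat.pos_of_ne_zero ha0)
  have hgle : Nat.gcd d.natAbs s.natAbs ≤ d.natAbs :=
    Nat.le_of_dvd (Nat.pos_of_ne_zero ha0) (Nat.gcd_dvd_left _ _)
  have hk0pos : 0 < d.natAbs / Nat.gcd d.natAbs s.natAbs := Nat.div_pos hgle hg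
  have hk0le : d.natAbs / Nat.gcd d.natAbs s.natAbs ≤ d.natAbs := Nat.div_le_self _ _
  have := pvLoopA_eq d s hd hs d.natAbs 1 (by omega) (by omega) (by omega)
  simpa using this

-- ===== VERDICT (by name: the statement is the Claim_ definition above) =====
theorem nbr_of_laps_06_spec : Claim_equal_nbr_of_laps_06 := by
  intro x y _ hpre
  obtain ⟨hx, hy⟩ := hpre
  unfold Spec_nbr_of_laps_06 nbr_of_laps_06 nbr_of_laps_06_alt
  rw [pvGcd_eq]
  by_cases hxy : x < y
  · simp only [if_pos hxy]
    rw [pvLoopA_closed x y hx hy,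
      PySem.Int.floordiv_natCast x.natAbs (Nat.gcd x.natAbs y.natAbs),
      mul_comm y ((x.natAbs / Nat.gcd x.natAbs y.natAbs : Nat) : Int)]
  · simp only [if_neg hxy]
    rw [pvLoopA_closed y x hy hx, Nat.gcd_comm x.natAbs y.natAbs,
      PySem.Int.floordiv_natCast y.natAbs (Nat.gcd y.natAbs x.natAbs),
      mul_comm x ((y.natAbs / Nat.gcd y.natAbs x.natAbs : Nat) : Int)]
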